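-- pv_equiv track=rewrite | github.com/schottkey7/codewars | Mathematics/twice_linear.py | dbl_linear
-- ===== SOURCE A (Python) =====
-- import bisect
--
-- def dbl_linear(n):
--     lst, index, q = [], set(), [1]
--     while len(lst) <= n:
--         x = q.pop(0)
--         if x not in index:
--             bisect.insort(lst, x)
--             index.add(x)
--             bisect.insort(q, 2 * x + 1)
--             bisect.insort(q, 3 * x + 1)
--     return lst[-1]
-- ===== SOURCE B (Python) =====
-- def dbl_linear(n):
--     u = []
--     x = 1
--     i = j = 0
--     while len(u) <= n:
--         u.append(x)
--         a = 2 * u[i] + 1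
--         b = 3 * u[j] + 1
--         x = min(a, b)
--         if a == x:
--             i += 1
--         if b == x:
--             j += 1
--     return u[n]
-- ===== Notes on version B (the rewrite author's own statement) =====
-- stated objective: faster
-- what changed: Replaced A's BFS over a sorted pending queue (pop-min, seen-set, repeated bisect.insort insertions) by the classic two-pointer dynamic programme that merges the 2x+1 and 3x+1 streams, appending each new term in O(1).
import Mathlib
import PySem

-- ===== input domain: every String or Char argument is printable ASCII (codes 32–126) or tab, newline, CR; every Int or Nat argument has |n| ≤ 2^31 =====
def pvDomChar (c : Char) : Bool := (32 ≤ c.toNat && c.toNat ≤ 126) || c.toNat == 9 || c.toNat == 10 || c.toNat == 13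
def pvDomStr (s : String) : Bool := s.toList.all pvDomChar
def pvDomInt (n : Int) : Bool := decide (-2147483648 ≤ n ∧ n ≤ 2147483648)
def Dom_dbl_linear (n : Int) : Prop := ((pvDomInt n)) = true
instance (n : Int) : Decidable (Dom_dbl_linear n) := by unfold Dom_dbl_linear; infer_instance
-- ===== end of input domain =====

-- B replaces A's pop-min queue + seen-set + bisect insertions by the two-pointer
-- merge of the 2x+1 and 3x+1 streams (objective: faster).

-- ===== PORT A =====
-- bisect.insort x into xs (insert at the bisect_right position)
def pyInsort (xs : List Int) (x : Int) : List Int :=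
  PySem.List.insert xs ((PySem.List.bisectRight xs x : Nat) : Int) x

-- fuel makes the while-loop structural; 2*n+3 iterations always suffice (each of the
-- n+1 insertions enqueues 2 candidates and every iteration pops one of the ≤ 2n+3 ever enqueued)
def aLoop (fuel : Nat) (n : Int) (lst : List Int) (index : PySem.Set Int) (q : List Int) : List Int :=
  match fuel with
  | 0 => lst
  | fuel + 1 =>
    if (lst.length : Int) ≤ n then
      match q with
      | [] => lst   -- Python's q.pop(0) raises IndexError here (unreachable for 0 ≤ n)
      | x :: qt =>
        if !(PySem.Set.contains index x) then
          aLoop fuel n (pyInsort lst x) (PySem.Set.add index x)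
            (pyInsort (pyInsort qt (2 * x + 1)) (3 * x + 1))
        else
          aLoop fuel n lst index qt
    else lst

-- lst[-1] (IndexError for n < 0, excluded by Pre_)
def dbl_linear (n : Int) : Int :=
  (PySem.List.pyGet? (aLoop (2 * n.toNat + 3) n [] PySem.Set.empty [1]) (-1)).getD 0

-- ===== PORT B =====
-- fuel makes the while-loop structural; it runs exactly n+1 iterations (one append each)
def bLoop (fuel : Nat) (n : Int) (u : List Int) (x : Int) (i j : Nat) : List Int :=
  match fuel with
  | 0 => u
  | fuel + 1 =>
    if (u.length : Int) ≤ n then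
      let u' := u ++ [x]
      let a := 2 * (PySem.List.pyGet? u' (i : Int)).getD 0 + 1
      let b := 3 * (PySem.List.pyGet? u' (j : Int)).getD 0 + 1
      let x' := min a b
      bLoop fuel n u' x' (if a = x' then i + 1 else i) (if b = x' then j + 1 else j)
    else u

-- u[n] (Python indexing; IndexError for n < 0, excluded by Pre_)
def dbl_linear_alt (n : Int) : Int :=
  (PySem.List.pyGet? (bLoop (n.toNat + 1) n [] 1 0 0) n).getD 0

-- ===== PRECONDITION & SPEC =====
-- Pre_ excludes exactly the inputs n < 0, on which both A and B raise IndexError.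
def Pre_dbl_linear (n : Int) : Prop := 0 ≤ n
instance (n : Int) : Decidable (Pre_dbl_linear n) := by unfold Pre_dbl_linear; infer_instance
def pvWitness_dbl_linear : Int := 5

def Spec_dbl_linear (n : Int) (out : Int) : Prop := out = dbl_linear_alt n
instance (n : Int) (out : Int) : Decidable (Spec_dbl_linear n out) := by unfold Spec_dbl_linear; infer_instance

-- ===== CLAIM (what is proved, stated in full; the proofs are below) =====
def Claim_equal_dbl_linear : Prop := ∀ (n : Int), Dom_dbl_linear n → Pre_dbl_linear n → Spec_dbl_linear n (dbl_linear n)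

-- ===== LEMMAS AND PROOFS =====

theorem pyInsort_length (xs : List Int) (x : Int) :
    (pyInsort xs x).length = xs.length + 1 := PySem.List.length_insert xs _ x

-- The canonical sequence: the merged stream built one term per step from ([1], 0, 0).
def bStep (s : List Int × Nat × Nat) : List Int × Nat × Nat :=
  let a := 2 * (PySem.List.pyGet? s.1 (s.2.1 : Int)).getD 0 + 1
  let b := 3 * (PySem.List.pyGet? s.1 (s.2.2 : Int)).getD 0 + 1
  let x := if a ≤ b then a else b
  (s.1 ++ [x], (if a = x then s.2.1 + 1 else s.2.1, if b = x then s.2.2 + 1 else s.2.2))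

def seq : Nat → List Int × Nat × Nat
  | 0 => ([1], 0, 0)
  | k + 1 => bStep (seq k)

-- xs[i] with default 0
def idx (u : List Int) (i : Nat) : Int := (PySem.List.pyGet? u (i : Int)).getD 0

def av (k : Nat) : Int := 2 * idx (seq k).1 (seq k).2.1 + 1
def bv (k : Nat) : Int := 3 * idx (seq k).1 (seq k).2.2 + 1
def nextv (k : Nat) : Int := if av k ≤ bv k then av k else bv k

theorem seq_succ_fst (k : Nat) : (seq (k + 1)).1 = (seq k).1 ++ [nextv k] := by
  simp [seq, bStep, nextv, av, bv, idx]

theorem seq_succ_i (k : Nat) :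
    (seq (k + 1)).2.1 = if av k = nextv k then (seq k).2.1 + 1 else (seq k).2.1 := by
  simp [seq, bStep, nextv, av, bv, idx]

theorem seq_succ_j (k : Nat) :
    (seq (k + 1)).2.2 = if bv k = nextv k then (seq k).2.2 + 1 else (seq k).2.2 := by
  simp [seq, bStep, nextv, av, bv, idx]

theorem nextv_cases (k : Nat) : nextv k = av k ∨ (nextv k = bv k ∧ bv k < av k) := by
  unfold nextv; split_ifs with h
  · exact Or.inl rfl
  · exact Or.inr ⟨rfl, by omega⟩

theorem nextv_le_av (k : Nat) : nextv k ≤ av k := by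
  unfold nextv; split_ifs with h <;> omega

theorem nextv_le_bv (k : Nat) : nextv k ≤ bv k := by
  unfold nextv; split_ifs with h <;> omega

theorem nextv_eq_min (k : Nat) : nextv k = min (av k) (bv k) := by
  rw [min_def]; rfl

theorem idx_eq_getElem (u : List Int) (i : Nat) (h : i < u.length) : idx u i = u[i] := by
  simp [idx, PySem.List.pyGet?_natCast, List.getElem?_eq_getElem h]

theorem idx_mem (u : List Int) (i : Nat) (h : i < u.length) : idx u i ∈ u := by
  rw [idx_eq_getElem u i h]; exact List.getElem_mem h

theorem idx_append_lt (u : List Int) (x : Int) (a : Nat) (h : a < u.length) :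
    idx (u ++ [x]) a = idx u a := by
  simp only [idx, PySem.List.pyGet?_natCast]
  rw [List.getElem?_append_left h]

theorem idx_append_len (u : List Int) (x : Int) : idx (u ++ [x]) u.length = x := by
  simp only [idx, PySem.List.pyGet?_natCast]
  simp

theorem getLastD_eq_getElem (u : List Int) (m : Nat) (h : u.length = m + 1) :
    u.getLastD 0 = u[m]'(by omega) := by
  rw [List.getLastD_eq_getLast?, List.getLast?_eq_getElem?]
  have hm : u.length - 1 = m := by omega
  rw [hm, List.getElem?_eq_getElem (by omega)]
  rfl

theorem getLastD_mem (u : List Int) (h : u ≠ []) : u.getLastD 0 ∈ u := by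
  have hlen : u.length - 1 + 1 = u.length := by
    cases u with
    | nil => exact absurd rfl h
    | cons a t => simp
  rw [getLastD_eq_getElem u (u.length - 1) (by omega)]
  exact List.getElem_mem (by omega)

theorem le_getLastD_of_sorted (u : List Int) (h : List.Pairwise (· ≤ ·) u)
    (y : Int) (hy : y ∈ u) : y ≤ u.getLastD 0 := by
  obtain ⟨i, hi, rfl⟩ := List.mem_iff_getElem.1 hy
  rw [getLastD_eq_getElem u (u.length - 1) (by omega)]
  rcases Nat.lt_or_ge i (u.length - 1) with hlt | hge
  · exact List.pairwise_iff_getElem.1 h i (u.length - 1) hi (by omega) hlt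
  · have : i = u.length - 1 := by omega
    subst this
    exact le_refl _

theorem sorted_getElem_le (u : List Int) (h : List.Pairwise (· < ·) u) (i a : Nat)
    (hi : i < u.length) (ha : a < u.length) (hle : i ≤ a) : u[i] ≤ u[a] := by
  rcases Nat.lt_or_ge i a with hlt | hge
  · exact le_of_lt (List.pairwise_iff_getElem.1 h i a hi ha hlt)
  · have : i = a := by omega
    subst this
    exact le_refl _

-- Invariant of the canonical sequence
def SeqInv (k : Nat) : Prop :=
  (seq k).1.length = k + 1 ∧
  List.Pairwise (· < ·) (seq k).1 ∧
  (∀ y ∈ (seq k).1, 1 ≤ y) ∧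
  (seq k).2.1 < (seq k).1.length ∧
  (seq k).2.2 < (seq k).1.length ∧
  (∀ a < (seq k).2.1, 2 * idx (seq k).1 a + 1 ∈ (seq k).1) ∧
  (∀ b < (seq k).2.2, 3 * idx (seq k).1 b + 1 ∈ (seq k).1) ∧
  (seq k).1.getLastD 0 < av k ∧
  (seq k).1.getLastD 0 < bv k

theorem seqInv (k : Nat) : SeqInv k := by
  induction k with
  | zero =>
    unfold SeqInv
    refine ⟨by decide, by decide, by decide, by decide, by decide, ?_, ?_, by decide, by decide⟩
    · intro a ha; simp [seq] at ha
    · intro b hb; simp [seq] at hb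
  | succ k ihk =>
    obtain ⟨hlen, hsort, hone, hi, hj, hclo2, hclo3, hfa, hfb⟩ := ihk
    have hsort' : List.Pairwise (· ≤ ·) (seq k).1 := hsort.imp le_of_lt
    have hne : (seq k).1 ≠ [] := by
      intro hh; rw [hh] at hlen; simp at hlen
    have hlast1 : 1 ≤ (seq k).1.getLastD 0 := hone _ (getLastD_mem _ hne)
    have hlast_lt : (seq k).1.getLastD 0 < nextv k := by
      rcases nextv_cases k with h | ⟨h, _⟩ <;> omega
    have hmem_lt : ∀ y ∈ (seq k).1, y < nextv k := fun y hy =>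
      lt_of_le_of_lt (le_getLastD_of_sorted _ hsort' _ hy) hlast_lt
    have hx1 : 1 ≤ nextv k := by omega
    have hlen' : (seq (k + 1)).1.length = (k + 1) + 1 := by
      rw [seq_succ_fst]; simp [hlen]
    have hlast' : (seq (k + 1)).1.getLastD 0 = nextv k := by
      rw [seq_succ_fst]; exact List.getLastD_concat
    have havdef : av k = 2 * idx (seq k).1 (seq k).2.1 + 1 := rfl
    have hbvdef : bv k = 3 * idx (seq k).1 (seq k).2.2 + 1 := rfl
    refine ⟨hlen', ?_, ?_, ?_, ?_, ?_, ?_, ?_, ?_⟩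
    · rw [seq_succ_fst]
      refine List.pairwise_append.2 ⟨hsort, by simp, ?_⟩
      intro y hy z hz
      simp only [List.mem_singleton] at hz
      subst hz
      exact hmem_lt y hy
    · rw [seq_succ_fst]
      intro y hy
      rcases List.mem_append.1 hy with h | h
      · exact hone y h
      · simp only [List.mem_singleton] at h; subst h; exact hx1
    · rw [seq_succ_i, hlen']
      rw [hlen] at hi
      split_ifs <;> omega
    · rw [seq_succ_j, hlen']
      rw [hlen] at hj
      split_ifs <;> omega
    · -- closure for i
      intro a ha
      rw [seq_succ_i] at ha
      rw [seq_succ_fst]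
      by_cases hcase : av k = nextv k
      · rw [if_pos hcase] at ha
        rcases Nat.lt_or_ge a (seq k).2.1 with h1 | h2
        · rw [idx_append_lt _ _ _ (by omega)]
          exact List.mem_append_left _ (hclo2 a h1)
        · have ha' : a = (seq k).2.1 := by omega
          subst ha'
          rw [idx_append_lt _ _ _ hi]
          have hxv : 2 * idx (seq k).1 (seq k).2.1 + 1 = nextv k := by omega
          rw [hxv]
          exact List.mem_append_right _ (List.mem_singleton.2 rfl)
      · rw [if_neg hcase] at ha
        rw [idx_append_lt _ _ _ (by omega)]
        exact List.mem_append_left _ (hclo2 a ha)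
    · -- closure for j
      intro b hb
      rw [seq_succ_j] at hb
      rw [seq_succ_fst]
      by_cases hcase : bv k = nextv k
      · rw [if_pos hcase] at hb
        rcases Nat.lt_or_ge b (seq k).2.2 with h1 | h2
        · rw [idx_append_lt _ _ _ (by omega)]
          exact List.mem_append_left _ (hclo3 b h1)
        · have hb' : b = (seq k).2.2 := by omega
          subst hb'
          rw [idx_append_lt _ _ _ hj]
          have hxv : 3 * idx (seq k).1 (seq k).2.2 + 1 = nextv k := by omega
          rw [hxv]
          exact List.mem_append_right _ (List.mem_singleton.2 rfl)
      · rw [if_neg hcase] at hb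
        rw [idx_append_lt _ _ _ (by omega)]
        exact List.mem_append_left _ (hclo3 b hb)
    · -- frontier for av
      have havdef' : av (k + 1) = 2 * idx (seq (k + 1)).1 (seq (k + 1)).2.1 + 1 := rfl
      rw [havdef', hlast', seq_succ_i, seq_succ_fst]
      by_cases hcase : av k = nextv k
      · rw [if_pos hcase]
        rcases Nat.lt_or_ge ((seq k).2.1 + 1) (seq k).1.length with h1 | h2
        · rw [idx_append_lt _ _ _ h1]
          have hstep : idx (seq k).1 (seq k).2.1 < idx (seq k).1 ((seq k).2.1 + 1) := by
            rw [idx_eq_getElem _ _ hi, idx_eq_getElem _ _ h1]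
            exact List.pairwise_iff_getElem.1 hsort _ _ hi h1 (Nat.lt_succ_self _)
          omega
        · have heq : (seq k).2.1 + 1 = (seq k).1.length := by omega
          rw [heq, idx_append_len]
          omega
      · rw [if_neg hcase]
        rw [idx_append_lt _ _ _ hi]
        rcases nextv_cases k with h | ⟨h, hlt⟩
        · exact absurd h.symm hcase
        · omega
    · -- frontier for bv
      have hbvdef' : bv (k + 1) = 3 * idx (seq (k + 1)).1 (seq (k + 1)).2.2 + 1 := rfl
      rw [hbvdef', hlast', seq_succ_j, seq_succ_fst]
      by_cases hcase : bv k = nextv k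
      · rw [if_pos hcase]
        rcases Nat.lt_or_ge ((seq k).2.2 + 1) (seq k).1.length with h1 | h2
        · rw [idx_append_lt _ _ _ h1]
          have hstep : idx (seq k).1 (seq k).2.2 < idx (seq k).1 ((seq k).2.2 + 1) := by
            rw [idx_eq_getElem _ _ hj, idx_eq_getElem _ _ h1]
            exact List.pairwise_iff_getElem.1 hsort _ _ hj h1 (Nat.lt_succ_self _)
          omega
        · have heq : (seq k).2.2 + 1 = (seq k).1.length := by omega
          rw [heq, idx_append_len]
          omega
      · rw [if_neg hcase]
        rw [idx_append_lt _ _ _ hj]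
        have hnb := nextv_le_bv k
        omega

-- B's loop computes the canonical sequence: at the top of each iteration the
-- appended-so-far list plus the pending value x equals (seq k).1.
theorem bLoop_eq (d : Nat) : ∀ (n : Int) (k : Nat) (u : List Int) (x : Int),
    0 ≤ n → d = n.toNat + 1 - k → (k : Int) ≤ n + 1 →
    u ++ [x] = (seq k).1 → u.length = k →
    bLoop d n u x (seq k).2.1 (seq k).2.2 = (seq n.toNat).1 := by
  induction d with
  | zero =>
    intro n k u x hn hd hk hux hul
    have hkn : k = n.toNat + 1 := by omega
    show u = (seq n.toNat).1
    subst hkn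
    have hsucc : (seq (n.toNat + 1)).1 = (seq n.toNat).1 ++ [nextv n.toNat] := seq_succ_fst _
    rw [hsucc] at hux
    have hlen2 : u.length = (seq n.toNat).1.length := by
      rw [hul, (seqInv n.toNat).1]
    exact (List.append_inj hux hlen2).1
  | succ d ih =>
    intro n k u x hn hd hk hux hul
    have hkn : (k : Int) ≤ n := by omega
    show (if (u.length : Int) ≤ n then _ else u) = (seq n.toNat).1
    rw [if_pos (by rw [hul]; exact hkn)]
    simp only [hux]
    have hmin : min (av k) (bv k) = nextv k := (nextv_eq_min k).symm
    show bLoop d n (seq k).1 (min (av k) (bv k))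
        (if av k = min (av k) (bv k) then (seq k).2.1 + 1 else (seq k).2.1)
        (if bv k = min (av k) (bv k) then (seq k).2.2 + 1 else (seq k).2.2) = (seq n.toNat).1
    rw [hmin, ← seq_succ_i, ← seq_succ_j]
    exact ih n (k + 1) (seq k).1 (nextv k) hn (by omega) (by push_cast; omega)
      (seq_succ_fst k).symm (by rw [(seqInv k).1])

theorem dbl_linear_alt_eq (n : Int) (h : 0 ≤ n) :
    dbl_linear_alt n = (seq n.toNat).1.getLastD 0 := by
  unfold dbl_linear_alt
  have h0 : bLoop (n.toNat + 1) n [] 1 0 0 = (seq n.toNat).1 :=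
    bLoop_eq (n.toNat + 1) n 0 [] 1 h (by omega) (by omega) (by simp [seq]) rfl
  rw [h0]
  have hlen := (seqInv n.toNat).1
  have hlt : n.toNat < (seq n.toNat).1.length := by omega
  have hn' : ((n.toNat : Nat) : Int) = n := Int.toNat_of_nonneg h
  have hget : PySem.List.pyGet? (seq n.toNat).1 n = (seq n.toNat).1[n.toNat]? := by
    have hpc := PySem.List.pyGet?_natCast (seq n.toNat).1 n.toNat
    rw [hn'] at hpc
    exact hpc
  rw [hget, List.getElem?_eq_getElem hlt]
  simp only [Option.getD_some]
  rw [getLastD_eq_getElem _ n.toNat hlen]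

-- pyInsort characterisation on a sorted list
theorem pyInsort_eq_take_drop (xs : List Int) (x : Int) (h : List.Pairwise (· ≤ ·) xs) :
    pyInsort xs x = xs.take (PySem.List.bisectRight xs x) ++
      x :: xs.drop (PySem.List.bisectRight xs x) := by
  have hs := PySem.List.bisectRight_spec xs x h
  unfold pyInsort
  rw [PySem.List.insert_natCast xs _ x hs.1]

theorem pyInsort_mem (xs : List Int) (x : Int) (h : List.Pairwise (· ≤ ·) xs) (z : Int) :
    z ∈ pyInsort xs x ↔ z = x ∨ z ∈ xs := by
  rw [pyInsort_eq_take_drop xs x h]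
  constructor
  · intro hz
    rcases List.mem_append.1 hz with h1 | h1
    · exact Or.inr (List.mem_of_mem_take h1)
    · rcases List.mem_cons.1 h1 with h2 | h2
      · exact Or.inl h2
      · exact Or.inr (List.mem_of_mem_drop h2)
  · intro hz
    rcases hz with rfl | hz
    · exact List.mem_append_right _ (List.mem_cons_self)
    · have hz2 : z ∈ xs.take (PySem.List.bisectRight xs x) ++
          xs.drop (PySem.List.bisectRight xs x) := by
        rw [List.take_append_drop]; exact hz
      rcases List.mem_append.1 hz2 with h1 | h1
      · exact List.mem_append_left _ h1
      · exact List.mem_append_right _ (List.mem_cons_of_mem _ h1)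

theorem pyInsort_sorted (xs : List Int) (x : Int) (h : List.Pairwise (· ≤ ·) xs) :
    List.Pairwise (· ≤ ·) (pyInsort xs x) := by
  have hs := PySem.List.bisectRight_spec xs x h
  rw [pyInsort_eq_take_drop xs x h]
  have hdrop_gt : ∀ z ∈ xs.drop (PySem.List.bisectRight xs x), x < z := by
    intro z hz
    obtain ⟨t, ht, rfl⟩ := List.mem_iff_getElem.1 hz
    have htlen : PySem.List.bisectRight xs x + t < xs.length := by
      have := List.length_drop (l := xs) (i := PySem.List.bisectRight xs x)
      omega
    rw [List.getElem_drop]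
    exact hs.2.2 _ htlen (by omega)
  have htake_le : ∀ z ∈ xs.take (PySem.List.bisectRight xs x), z ≤ x := by
    intro z hz
    obtain ⟨t, ht, rfl⟩ := List.mem_iff_getElem.1 hz
    have hlent : (xs.take (PySem.List.bisectRight xs x)).length =
        min (PySem.List.bisectRight xs x) xs.length := List.length_take
    have htlen : t < xs.length := by omega
    have htp : t < PySem.List.bisectRight xs x := by omega
    rw [List.getElem_take]
    exact hs.2.1 t htlen htp
  refine List.pairwise_append.2 ⟨h.sublist (List.take_sublist _ _), ?_, ?_⟩
  · refine List.pairwise_cons.2 ⟨?_, h.sublist (List.drop_sublist _ _)⟩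
    intro z hz
    exact le_of_lt (hdrop_gt z hz)
  · intro y hy z hz
    have hyx := htake_le y hy
    rcases List.mem_cons.1 hz with rfl | hz'
    · exact hyx
    · exact le_trans hyx (le_of_lt (hdrop_gt z hz'))

theorem pyInsort_append (xs : List Int) (x : Int) (h : List.Pairwise (· ≤ ·) xs)
    (hx : ∀ y ∈ xs, y < x) : pyInsort xs x = xs ++ [x] := by
  have hs := PySem.List.bisectRight_spec xs x h
  have hp : PySem.List.bisectRight xs x = xs.length := by
    by_contra hne
    have hlt : PySem.List.bisectRight xs x < xs.length := by
      have := hs.1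
      omega
    have h1 := hs.2.2 _ hlt (le_refl _)
    have h2 := hx _ (List.getElem_mem hlt)
    omega
  rw [pyInsort_eq_take_drop xs x h, hp]
  simp

-- Set helpers
theorem contains_iff_mem (s : List Int) (z : Int) : List.contains s z = true ↔ z ∈ s := by
  simp

theorem contains_add_iff (s : PySem.Set Int) (x z : Int) :
    PySem.Set.contains (PySem.Set.add s x) z = true ↔
      (PySem.Set.contains s z = true ∨ z = x) := by
  simp only [PySem.Set.add]
  split_ifs with hmem
  · constructor
    · exact Or.inl
    · rintro (h | rfl)
      · exact h
      · exact hmem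
  · show List.contains (s ++ [x]) z = true ↔ (List.contains s z = true ∨ z = x)
    rw [contains_iff_mem, contains_iff_mem, List.mem_append]
    simp

-- Invariant of A's loop state: lst = (seq k).1
def AInv (k : Nat) (index : PySem.Set Int) (q : List Int) : Prop :=
  (∀ z : Int, PySem.Set.contains index z = true ↔ z ∈ (seq k).1) ∧
  List.Pairwise (· ≤ ·) q ∧
  (∀ e ∈ q, (seq k).1.getLastD 0 ≤ e) ∧
  (∀ e ∈ q, e ∈ (seq k).1 ∨ ∃ y ∈ (seq k).1, e = 2 * y + 1 ∨ e = 3 * y + 1) ∧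
  (∀ y ∈ (seq k).1, (2 * y + 1 ∈ (seq k).1 ∨ 2 * y + 1 ∈ q) ∧
                    (3 * y + 1 ∈ (seq k).1 ∨ 3 * y + 1 ∈ q))

theorem aLoop_eq (f : Nat) : ∀ (q : List Int) (n : Int) (k : Nat) (index : PySem.Set Int),
    0 ≤ n → (k : Int) ≤ n → q.length + 2 * (n.toNat - k) ≤ f → AInv k index q →
    aLoop f n (seq k).1 index q = (seq n.toNat).1 := by
  induction f with
  | zero =>
    intro q n k index hn hk hf _
    have hkn : k = n.toNat := by omega
    subst hkn
    rfl
  | succ f ih =>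
    intro q n k index hn hk hf hinv
    obtain ⟨hklen, hsort, hone, hi, hj, hclo2, hclo3, hfa, hfb⟩ := seqInv k
    by_cases hkeq : k = n.toNat
    · subst hkeq
      show (if ((seq n.toNat).1.length : Int) ≤ n then _ else (seq n.toNat).1) = (seq n.toNat).1
      rw [if_neg (by rw [hklen]; push_cast; omega)]
    have hkn : k < n.toNat := by omega
    have hg : (((seq k).1.length) : Int) ≤ n := by rw [hklen]; push_cast; omega
    have hsort' : List.Pairwise (· ≤ ·) (seq k).1 := hsort.imp le_of_lt
    have hne : (seq k).1 ≠ [] := by intro hh; rw [hh] at hklen; simp at hklen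
    have hlast1 : 1 ≤ (seq k).1.getLastD 0 := hone _ (getLastD_mem _ hne)
    have havdef : av k = 2 * idx (seq k).1 (seq k).2.1 + 1 := rfl
    have hbvdef : bv k = 3 * idx (seq k).1 (seq k).2.2 + 1 := rfl
    cases q with
    | nil =>
      obtain ⟨hcont, hqsort, hlb, hsnd, hcov⟩ := hinv
      exfalso
      rcases (hcov _ (getLastD_mem _ hne)).1 with hmem | hq
      · have h1 := le_getLastD_of_sorted _ hsort' _ hmem
        omega
      · simp at hq
    | cons x qt =>
      obtain ⟨hcont, hqsort, hlb, hsnd, hcov⟩ := hinv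
      have hunf : aLoop (f + 1) n (seq k).1 index (x :: qt) =
          (if (!PySem.Set.contains index x) = true then
            aLoop f n (pyInsort (seq k).1 x) (PySem.Set.add index x)
              (pyInsort (pyInsort qt (2 * x + 1)) (3 * x + 1))
          else aLoop f n (seq k).1 index qt) := by
        show (if ((seq k).1.length : Int) ≤ n then _ else (seq k).1) = _
        rw [if_pos hg]
      rw [hunf]
      have hhead : ∀ e ∈ qt, x ≤ e := fun e he => List.rel_of_pairwise_cons hqsort he
      by_cases hmem : x ∈ (seq k).1
      · -- duplicate: skip
        have hc : PySem.Set.contains index x = true := (hcont x).2 hmem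
        rw [hc]
        simp only [Bool.not_true, Bool.false_eq_true, if_false]
        apply ih qt n k index hn hk (by simp only [List.length_cons] at hf; omega)
        refine ⟨hcont, (List.pairwise_cons.1 hqsort).2, ?_, ?_, ?_⟩
        · exact fun e he => hlb e (List.mem_cons_of_mem _ he)
        · exact fun e he => hsnd e (List.mem_cons_of_mem _ he)
        · intro y hy
          obtain ⟨h2, h3⟩ := hcov y hy
          constructor
          · rcases h2 with h | h
            · exact Or.inl h
            · rcases List.mem_cons.1 h with h' | h'
              · rw [h']; exact Or.inl hmem
              · exact Or.inr h'
          · rcases h3 with h | h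
            · exact Or.inl h
            · rcases List.mem_cons.1 h with h' | h'
              · rw [h']; exact Or.inl hmem
              · exact Or.inr h'
      · -- new element: x = nextv k
        have hcnot : PySem.Set.contains index x = false := by
          cases hval : PySem.Set.contains index x
          · rfl
          · exact absurd ((hcont x).1 hval) hmem
        rw [hcnot]
        simp only [Bool.not_false, if_true]
        have hxcand : ∃ y ∈ (seq k).1, x = 2 * y + 1 ∨ x = 3 * y + 1 := by
          rcases hsnd x (List.mem_cons_self) with h | h
          · exact absurd h hmem
          · exact h
        have hav_mem : av k ∈ x :: qt := by
          rcases (hcov _ (idx_mem _ _ hi)).1 with h | h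
          · exfalso
            have h1 := le_getLastD_of_sorted _ hsort' _ h
            omega
          · rw [havdef]; exact h
        have hbv_mem : bv k ∈ x :: qt := by
          rcases (hcov _ (idx_mem _ _ hj)).2 with h | h
          · exfalso
            have h1 := le_getLastD_of_sorted _ hsort' _ h
            omega
          · rw [hbvdef]; exact h
        have hnext_mem : nextv k ∈ x :: qt := by
          unfold nextv; split_ifs
          · exact hav_mem
          · exact hbv_mem
        have hx_le_next : x ≤ nextv k := by
          rcases List.mem_cons.1 hnext_mem with h | h
          · exact le_of_eq h.symm
          · exact hhead _ h
        have hnext_le_x : nextv k ≤ x := by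
          obtain ⟨y, hy, hcase⟩ := hxcand
          obtain ⟨a, halen, hay⟩ := List.mem_iff_getElem.1 hy
          rcases hcase with h2 | h3
          · have hia : (seq k).2.1 ≤ a := by
              rcases Nat.lt_or_ge a (seq k).2.1 with hlt | hge
              · exfalso
                have hin := hclo2 a hlt
                rw [idx_eq_getElem _ _ halen, hay, ← h2] at hin
                exact hmem hin
              · exact hge
            have hle := sorted_getElem_le _ hsort _ _ hi halen hia
            have hnav := nextv_le_av k
            have hav2 := havdef
            rw [idx_eq_getElem _ _ hi] at hav2
            rw [hay] at hle
            omega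
          · have hja : (seq k).2.2 ≤ a := by
              rcases Nat.lt_or_ge a (seq k).2.2 with hlt | hge
              · exfalso
                have hin := hclo3 a hlt
                rw [idx_eq_getElem _ _ halen, hay, ← h3] at hin
                exact hmem hin
              · exact hge
            have hle := sorted_getElem_le _ hsort _ _ hj halen hja
            have hnbv := nextv_le_bv k
            have hbv2 := hbvdef
            rw [idx_eq_getElem _ _ hj] at hbv2
            rw [hay] at hle
            omega
        have hxeq : x = nextv k := le_antisymm hx_le_next hnext_le_x
        have hlast_lt_x : (seq k).1.getLastD 0 < x := by
          rw [hxeq]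
          rcases nextv_cases k with h | ⟨h, _⟩ <;> omega
        have hmem_lt : ∀ y ∈ (seq k).1, y < x := fun y hy =>
          lt_of_le_of_lt (le_getLastD_of_sorted _ hsort' _ hy) hlast_lt_x
        have hx1 : 1 ≤ x := by omega
        have hlst' : pyInsort (seq k).1 x = (seq (k + 1)).1 := by
          rw [pyInsort_append _ _ hsort' hmem_lt, seq_succ_fst, hxeq]
        rw [hlst']
        have hqt_sorted : List.Pairwise (· ≤ ·) qt := (List.pairwise_cons.1 hqsort).2
        have hq1_sorted := pyInsort_sorted qt (2 * x + 1) hqt_sorted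
        have hq2_sorted := pyInsort_sorted _ (3 * x + 1) hq1_sorted
        have hmemq' : ∀ z, z ∈ pyInsort (pyInsort qt (2 * x + 1)) (3 * x + 1) ↔
            z = 2 * x + 1 ∨ z = 3 * x + 1 ∨ z ∈ qt := by
          intro z
          rw [pyInsort_mem _ _ hq1_sorted, pyInsort_mem _ _ hqt_sorted]
          tauto
        have hmemu' : ∀ z, z ∈ (seq (k + 1)).1 ↔ z ∈ (seq k).1 ∨ z = x := by
          intro z
          rw [seq_succ_fst, ← hxeq]
          simp
        have hlastu' : (seq (k + 1)).1.getLastD 0 = x := by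
          rw [seq_succ_fst, ← hxeq]
          exact List.getLastD_concat
        apply ih _ n (k + 1) _ hn (by push_cast; omega)
          (by rw [pyInsort_length, pyInsort_length]
              simp only [List.length_cons] at hf
              omega)
        refine ⟨?_, hq2_sorted, ?_, ?_, ?_⟩
        · intro z
          rw [contains_add_iff, hcont z, hmemu' z]
        · intro e he
          rw [hlastu']
          rcases (hmemq' e).1 he with h | h | h
          · omega
          · omega
          · exact hhead e h
        · intro e he
          rcases (hmemq' e).1 he with h | h | h
          · exact Or.inr ⟨x, (hmemu' x).2 (Or.inr rfl), Or.inl h⟩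
          · exact Or.inr ⟨x, (hmemu' x).2 (Or.inr rfl), Or.inr h⟩
          · rcases hsnd e (List.mem_cons_of_mem _ h) with h' | ⟨y, hy, hc2⟩
            · exact Or.inl ((hmemu' e).2 (Or.inl h'))
            · exact Or.inr ⟨y, (hmemu' y).2 (Or.inl hy), hc2⟩
        · intro y hy
          rcases (hmemu' y).1 hy with hyu | hyx
          · obtain ⟨h2, h3⟩ := hcov y hyu
            constructor
            · rcases h2 with h | h
              · exact Or.inl ((hmemu' _).2 (Or.inl h))
              · rcases List.mem_cons.1 h with h' | h'
                · exact Or.inl ((hmemu' _).2 (Or.inr h'))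
                · exact Or.inr ((hmemq' _).2 (Or.inr (Or.inr h')))
            · rcases h3 with h | h
              · exact Or.inl ((hmemu' _).2 (Or.inl h))
              · rcases List.mem_cons.1 h with h' | h'
                · exact Or.inl ((hmemu' _).2 (Or.inr h'))
                · exact Or.inr ((hmemq' _).2 (Or.inr (Or.inr h')))
          · subst hyx
            constructor
            · exact Or.inr ((hmemq' _).2 (Or.inl rfl))
            · exact Or.inr ((hmemq' _).2 (Or.inr (Or.inl rfl)))

theorem dbl_linear_eq (n : Int) (h : 0 ≤ n) :
    dbl_linear n = (seq n.toNat).1.getLastD 0 := by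
  unfold dbl_linear
  have h1 : pyInsort [] (1 : Int) = [1] := by
    simpa using pyInsort_append [] 1 (by simp) (by simp)
  have h3 : pyInsort [] (3 : Int) = [3] := by
    simpa using pyInsort_append [] 3 (by simp) (by simp)
  have h4 : pyInsort [3] (4 : Int) = [3, 4] := by
    have := pyInsort_append [3] 4 (by simp) (by intro y hy; simp at hy; omega)
    simpa using this
  have hstep : aLoop (2 * n.toNat + 2 + 1) n [] PySem.Set.empty [1] =
      aLoop (2 * n.toNat + 2) n (seq 0).1 (PySem.Set.add PySem.Set.empty 1) [3, 4] := by
    show (if (([] : List Int).length : Int) ≤ n then _ else ([] : List Int)) = _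
    rw [if_pos (by simpa using h)]
    show aLoop (2 * n.toNat + 2) n (pyInsort [] 1) (PySem.Set.add PySem.Set.empty 1)
        (pyInsort (pyInsort [] (2 * 1 + 1)) (3 * 1 + 1)) = _
    norm_num
    rw [h1, h3, h4]
    simp [seq]
  rw [show 2 * n.toNat + 3 = 2 * n.toNat + 2 + 1 from rfl, hstep]
  have hainv : AInv 0 (PySem.Set.add PySem.Set.empty 1) [3, 4] := by
    refine ⟨?_, by decide, by decide, by decide, by decide⟩
    intro z
    rw [contains_add_iff]
    simp [seq]
  rw [aLoop_eq (2 * n.toNat + 2) [3, 4] n 0 (PySem.Set.add PySem.Set.empty 1) h (by omega)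
    (by simp; omega) hainv]
  rw [PySem.List.pyGet?_neg_one, List.getLastD_eq_getLast?]

-- ===== VERDICT (by name: the statement is the Claim_ definition above) =====
theorem dbl_linear_spec : Claim_equal_dbl_linear := by
  intro n _ hpre
  unfold Spec_dbl_linear
  rw [dbl_linear_eq n hpre, dbl_linear_alt_eq n hpre]
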